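-- pv_equiv track=rewrite | github.com/cburdine/nisq-open-quantum-systems | open_quantum_systems/math_util.py | common_measurement_basis
-- ===== SOURCE A (Python) =====
-- def common_measurement_basis(pauli_list, default='Z'):
--
--     assert(len(default) == 1)
--     basis = ['I']*len(pauli_list[0])
--     for pauli in pauli_list:
--         assert(len(pauli) == len(basis))
--         for i, ch in enumerate(pauli):
--             if ch != 'I' and ch != basis[i]:
--                 assert(basis[i] == 'I')
--                 basis[i] = ch
--     basis_str = ''.join(basis).replace('I', default)
--     return basis_str
-- ===== SOURCE B (Python) =====
-- def common_measurement_basis(pauli_list, default='Z'):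
--     assert len(default) == 1
--     n = len(pauli_list[0])
--     assert all(len(p) == n for p in pauli_list)
--     chars = []
--     for i in range(n):
--         s = {p[i] for p in pauli_list} - {'I'}
--         assert len(s) <= 1
--         chars.append(s.pop() if s else default)
--     return ''.join(chars)
-- ===== Notes on version B (the rewrite author's own statement) =====
-- stated objective: alternative
-- what changed: Instead of threading a mutable basis array through a row-major double loop with conditional in-place overwrites, B builds the result column-by-column: for each qubit position it forms the set of characters in that column minus 'I' and takes its unique element (or the default).
import Mathlib
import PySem

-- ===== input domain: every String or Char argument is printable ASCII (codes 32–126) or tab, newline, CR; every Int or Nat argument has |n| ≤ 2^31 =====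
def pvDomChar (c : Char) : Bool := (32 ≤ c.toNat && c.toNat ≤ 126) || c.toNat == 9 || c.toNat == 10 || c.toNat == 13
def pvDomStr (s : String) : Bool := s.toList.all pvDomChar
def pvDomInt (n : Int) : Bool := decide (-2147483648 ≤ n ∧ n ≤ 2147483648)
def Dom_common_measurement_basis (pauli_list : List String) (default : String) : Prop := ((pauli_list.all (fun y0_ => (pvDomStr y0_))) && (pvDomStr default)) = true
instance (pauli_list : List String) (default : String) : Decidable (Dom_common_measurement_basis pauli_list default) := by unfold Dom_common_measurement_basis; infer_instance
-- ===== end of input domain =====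

-- B replaces A's row-major double loop with in-place overwrites by a column-wise
-- set-based construction (alternative decomposition; same asymptotic cost).

-- ===== PORT A =====
-- inner 'for i, ch in enumerate(pauli): …' loop of A, acting on the basis list
def cmbInner (basis : List Char) (pauli : List Char) : List Char :=
  (PySem.List.enumerate pauli).foldl
    (fun b ic =>
      if ic.2 ≠ 'I' ∧ ic.2 ≠ PySem.List.pyGetD b ic.1 'I'
      then PySem.List.pySetD b ic.1 ic.2 else b) basis

def common_measurement_basis (pauli_list : List String) (default : String) : String :=
  -- assert len(default) == 1 and the per-pauli length asserts are reflected in Pre_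
  let basis0 : List Char := List.replicate (pauli_list.headD "").toList.length 'I'
  let basis := pauli_list.foldl (fun b p => cmbInner b p.toList) basis0
  PySem.Str.replace (String.ofList basis) "I" default

-- ===== PORT B =====
def common_measurement_basis_alt (pauli_list : List String) (default : String) : String :=
  let n := (pauli_list.headD "").toList.length
  String.ofList ((List.range n).map (fun i =>
    let s : PySem.Set Char :=
      PySem.Set.diff (PySem.Set.ofList (pauli_list.map (fun p => p.toList.getD i ' ')))
        (PySem.Set.ofList ['I'])
    match s with
    | [] => default.toList.getD 0 ' '
    | c :: _ => c))

-- ===== PRECONDITION & SPEC =====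
-- Pre_ = exactly the inputs where A returns normally: a one-character default, a
-- nonempty pauli list (else IndexError), all paulis of equal length (else
-- AssertionError), and at most one distinct non-'I' character per column
-- (else AssertionError).
def Pre_common_measurement_basis (pauli_list : List String) (default : String) : Prop :=
  default.toList.length = 1 ∧ pauli_list ≠ [] ∧
  (∀ p ∈ pauli_list, p.toList.length = (pauli_list.headD "").toList.length) ∧
  (∀ p ∈ pauli_list, ∀ q ∈ pauli_list, ∀ i ∈ List.range (pauli_list.headD "").toList.length,
    p.toList.getD i ' ' ≠ 'I' → q.toList.getD i ' ' ≠ 'I' →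
      p.toList.getD i ' ' = q.toList.getD i ' ')
instance (pauli_list : List String) (default : String) : Decidable (Pre_common_measurement_basis pauli_list default) := by unfold Pre_common_measurement_basis; infer_instance

def pvWitness_common_measurement_basis : List String × String := (["XI", "IZ"], "Z")

def Spec_common_measurement_basis (pauli_list : List String) (default : String) (out : String) : Prop := out = common_measurement_basis_alt pauli_list default
instance (pauli_list : List String) (default : String) (out : String) : Decidable (Spec_common_measurement_basis pauli_list default out) := by unfold Spec_common_measurement_basis; infer_instance

-- ===== CLAIM (what is proved, stated in full; the proofs are below) =====
def Claim_equal_common_measurement_basis : Prop := ∀ (pauli_list : List String) (default : String), Dom_common_measurement_basis pauli_list default → Pre_common_measurement_basis pauli_list default → Spec_common_measurement_basis pauli_list default (common_measurement_basis pauli_list default)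

-- ===== LEMMAS AND PROOFS =====

-- the per-cell effect of one pass of A's inner loop
def cmbMerge (a c : Char) : Char := if c = 'I' then a else c

lemma cmbInner_go (p : List Char) : ∀ (pre b : List Char), p.length = b.length →
    ((PySem.List.enumerate p (pre.length : Int)).foldl
      (fun b ic =>
        if ic.2 ≠ 'I' ∧ ic.2 ≠ PySem.List.pyGetD b ic.1 'I'
        then PySem.List.pySetD b ic.1 ic.2 else b) (pre ++ b))
      = pre ++ List.zipWith cmbMerge b p := by
  induction p with
  | nil =>
    intro pre b h
    have hb : b = [] := List.eq_nil_of_length_eq_zero h.symm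
    subst hb
    simp [PySem.List.enumerate]
  | cons c t ih =>
    intro pre b h
    match b with
    | [] => simp at h
    | bc :: bt =>
      have hget : PySem.List.pyGetD (pre ++ bc :: bt) (pre.length : Int) 'I' = bc := by
        rw [PySem.List.pyGetD_natCast, List.getD_append_right _ _ _ _ le_rfl]
        simp
      have hset : PySem.List.pySetD (pre ++ bc :: bt) (pre.length : Int) c = pre ++ c :: bt := by
        unfold PySem.List.pySetD
        rw [PySem.List.pySet?_natCast _ _ _ (by simp)]
        simp [List.set_append_right _ _ le_rfl]
      rw [PySem.List.enumerate_cons, List.foldl_cons]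
      have key : (if c ≠ 'I' ∧ c ≠ PySem.List.pyGetD (pre ++ bc :: bt) ((pre.length : Int)) 'I'
          then PySem.List.pySetD (pre ++ bc :: bt) ((pre.length : Int)) c else pre ++ bc :: bt)
          = pre ++ cmbMerge bc c :: bt := by
        rw [hget]
        by_cases h1 : c = 'I'
        · simp [h1, cmbMerge]
        · by_cases h2 : c = bc
          · simp [h2, cmbMerge]
          · simp [h1, h2, cmbMerge, hset]
      have hlen : t.length = bt.length := by simpa using h
      have hcast : (pre.length : Int) + 1 = (((pre ++ [cmbMerge bc c]).length : Nat) : Int) := by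
        simp
      calc ((PySem.List.enumerate t ((pre.length : Int) + 1)).foldl
              (fun b ic =>
                if ic.2 ≠ 'I' ∧ ic.2 ≠ PySem.List.pyGetD b ic.1 'I'
                then PySem.List.pySetD b ic.1 ic.2 else b)
              ((fun b ic =>
                if ic.2 ≠ 'I' ∧ ic.2 ≠ PySem.List.pyGetD b ic.1 'I'
                then PySem.List.pySetD b ic.1 ic.2 else b) (pre ++ bc :: bt) ((pre.length : Int), c)))
          = ((PySem.List.enumerate t (((pre ++ [cmbMerge bc c]).length : Nat) : Int)).foldl
              (fun b ic =>
                if ic.2 ≠ 'I' ∧ ic.2 ≠ PySem.List.pyGetD b ic.1 'I'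
                then PySem.List.pySetD b ic.1 ic.2 else b)
              ((pre ++ [cmbMerge bc c]) ++ bt)) := by
            rw [← hcast]
            congr 1
            simpa using key
        _ = (pre ++ [cmbMerge bc c]) ++ List.zipWith cmbMerge bt t := ih (pre ++ [cmbMerge bc c]) bt hlen
        _ = pre ++ List.zipWith cmbMerge (bc :: bt) (c :: t) := by simp

lemma cmbInner_eq (b p : List Char) (h : p.length = b.length) :
    cmbInner b p = List.zipWith cmbMerge b p := by
  have := cmbInner_go p [] b h
  simpa [cmbInner] using this

lemma length_zipWith_cmbMerge (b p : List Char) (h : p.length = b.length) :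
    (List.zipWith cmbMerge b p).length = b.length := by
  simp [List.length_zipWith, h]

lemma getD_zipWith_cmbMerge (b p : List Char) (i : Nat) (h : p.length = b.length)
    (hi : i < b.length) :
    (List.zipWith cmbMerge b p).getD i ' ' = cmbMerge (b.getD i ' ') (p.getD i ' ') := by
  have hi2 : i < p.length := h ▸ hi
  have hz : i < (List.zipWith cmbMerge b p).length := by
    rw [length_zipWith_cmbMerge b p h]; exact hi
  rw [List.getD_eq_getElem _ _ hz, List.getD_eq_getElem _ _ hi, List.getD_eq_getElem _ _ hi2,
    List.getElem_zipWith]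

lemma foldl_zipWith_getD (ps : List (List Char)) : ∀ (b : List Char) (i : Nat),
    (∀ p ∈ ps, p.length = b.length) → i < b.length →
    (ps.foldl (fun b p => List.zipWith cmbMerge b p) b).getD i ' '
      = (ps.map (fun p => p.getD i ' ')).foldl cmbMerge (b.getD i ' ') := by
  induction ps with
  | nil => intro b i _ _; simp
  | cons p ps ih =>
    intro b i hlen hi
    have hp : p.length = b.length := hlen p (by simp)
    have hlen' : ∀ q ∈ ps, q.length = (List.zipWith cmbMerge b p).length := by
      intro q hq
      rw [length_zipWith_cmbMerge b p hp]
      exact hlen q (by simp [hq])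
    have hi' : i < (List.zipWith cmbMerge b p).length := by
      rw [length_zipWith_cmbMerge b p hp]; exact hi
    simp only [List.foldl_cons, List.map_cons]
    rw [ih (List.zipWith cmbMerge b p) i hlen' hi', getD_zipWith_cmbMerge b p i hp hi]

lemma length_foldl_zipWith (ps : List (List Char)) : ∀ (b : List Char),
    (∀ p ∈ ps, p.length = b.length) →
    (ps.foldl (fun b p => List.zipWith cmbMerge b p) b).length = b.length := by
  induction ps with
  | nil => intro b _; simp
  | cons p ps ih =>
    intro b hlen
    have hp : p.length = b.length := hlen p (by simp)
    simp only [List.foldl_cons]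
    rw [ih (List.zipWith cmbMerge b p) (by
      intro q hq
      rw [length_zipWith_cmbMerge b p hp]
      exact hlen q (by simp [hq]))]
    exact length_zipWith_cmbMerge b p hp

lemma foldl_cmbMerge_char (c : Char) (l : List Char) : ∀ (a : Char),
    (∀ x ∈ l, x ≠ 'I' → x = c) →
    l.foldl cmbMerge a = if l.any (fun x => x ≠ 'I') then c else a := by
  induction l with
  | nil => intro a _; simp
  | cons x t ih =>
    intro a hx
    simp only [List.foldl_cons]
    by_cases h1 : x = 'I'
    · rw [show cmbMerge a x = a by simp [cmbMerge, h1]]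
      rw [ih a (fun y hy hyI => hx y (List.mem_cons_of_mem _ hy) hyI)]
      simp [h1]
    · have hxc : x = c := hx x (by simp) h1
      rw [show cmbMerge a x = c by subst hxc; simp [cmbMerge, h1]]
      rw [ih c (fun y hy hyI => hx y (List.mem_cons_of_mem _ hy) hyI)]
      by_cases h2 : t.any (fun x => x ≠ 'I') <;> simp [h1]

lemma nodup_all_eq (c : Char) (l : List Char) (hn : l.Nodup)
    (he : ∀ x ∈ l, x = c) (hc : c ∈ l) : l = [c] := by
  match l with
  | [] => simp at hc
  | [x] => rw [he x (by simp)]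
  | x :: y :: t =>
    exfalso
    have hx : x = c := he x (by simp)
    have hy : y = c := he y (by simp)
    rw [List.nodup_cons] at hn
    exact hn.1 (by simp [hx, hy])

lemma replace_go_single (d : List Char) (l : List Char) : ∀ (acc : List Char) (fuel : Nat),
    l.length ≤ fuel →
    PySem.Chars.replace.go ['I'] d fuel l acc
      = acc.reverse ++ l.flatMap (fun c => if c = 'I' then d else [c]) := by
  induction l with
  | nil => intro acc fuel _; cases fuel <;> simp [PySem.Chars.replace.go]
  | cons c t ih =>
    intro acc fuel h
    cases fuel with
    | zero => simp at h
    | succ f =>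
      have hf : t.length ≤ f := by simpa using h
      rw [PySem.Chars.replace.go]
      by_cases h1 : c = 'I'
      · have hpre : List.isPrefixOf ['I'] (c :: t) = true := by simp [List.isPrefixOf, h1]
        rw [if_pos hpre]
        simp only [List.length_singleton, List.drop_succ_cons, List.drop_zero]
        rw [ih (d.reverse ++ acc) f hf]
        simp [h1]
      · have h1' : ¬ 'I' = c := fun hh => h1 hh.symm
        have hpre : ¬ List.isPrefixOf ['I'] (c :: t) = true := by simp [List.isPrefixOf, h1']
        rw [if_neg hpre]
        rw [ih (c :: acc) f hf]
        simp [h1]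

lemma replace_single (d : List Char) (cs : List Char) :
    PySem.Chars.replace cs ['I'] d
      = cs.flatMap (fun c => if c = 'I' then d else [c]) := by
  rw [PySem.Chars.replace]
  simp only [List.isEmpty_cons, Bool.false_eq_true, if_false]
  simpa using replace_go_single d cs [] cs.length le_rfl

-- A's outer loop, with the inner loop replaced by its zipWith description
lemma outer_fold (ps : List String) : ∀ (b : List Char),
    (∀ p ∈ ps, p.toList.length = b.length) →
    ps.foldl (fun b p => cmbInner b p.toList) b
      = (ps.map String.toList).foldl (fun b p => List.zipWith cmbMerge b p) b := by
  induction ps with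
  | nil => intro b _; simp
  | cons p ps ih =>
    intro b hlen
    have hp : p.toList.length = b.length := hlen p (by simp)
    simp only [List.foldl_cons, List.map_cons]
    rw [cmbInner_eq b p.toList hp, ih (List.zipWith cmbMerge b p.toList) (by
      intro q hq
      rw [length_zipWith_cmbMerge b p.toList hp]
      exact hlen q (by simp [hq]))]

lemma ofList_I : (PySem.Set.ofList ['I'] : PySem.Set Char) = ['I'] := by decide

-- ===== VERDICT (by name: the statement is the Claim_ definition above) =====
theorem common_measurement_basis_spec : Claim_equal_common_measurement_basis := by
  intro pl default _ hpre
  obtain ⟨hd1, hne, hlenall, hcol⟩ := hpre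
  obtain ⟨d0, hd0⟩ := List.length_eq_one_iff.mp hd1
  unfold Spec_common_measurement_basis
  simp only [common_measurement_basis, common_measurement_basis_alt]
  set n := (pl.headD "").toList.length with hn
  have hlen' : ∀ q ∈ pl, q.toList.length = (List.replicate n 'I').length := by
    intro q hq; simpa using hlenall q hq
  rw [outer_fold pl _ hlen']
  set psl := pl.map String.toList with hpsl
  have hlenq : ∀ q ∈ psl, q.length = (List.replicate n 'I').length := by
    intro q hq
    rw [hpsl] at hq
    obtain ⟨p, hp, rfl⟩ := List.mem_map.mp hq
    exact hlen' p hp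
  set basis := psl.foldl (fun b p => List.zipWith cmbMerge b p) (List.replicate n 'I') with hbasis
  have hblen : basis.length = n := by
    rw [hbasis, length_foldl_zipWith psl _ hlenq]; simp
  simp only [PySem.Str.replace]
  rw [show ("I" : String).toList = ['I'] by rfl]
  rw [String.toList_ofList, replace_single, hd0]
  have hflat : basis.flatMap (fun c => if c = 'I' then [d0] else [c])
      = basis.map (fun c => if c = 'I' then d0 else c) := by
    induction basis with
    | nil => rfl
    | cons c t iht =>
      simp only [List.flatMap_cons, List.map_cons, iht]
      by_cases hc : c = 'I' <;> simp [hc]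
  rw [hflat]
  refine congrArg String.ofList ?_
  apply List.ext_getElem (by simp [hblen])
  intro i hi1 hi2
  have hin : i < n := by simpa [hblen] using hi1
  -- the column at position i
  set col := pl.map (fun p => p.toList.getD i ' ') with hcoldef
  have hbg : basis.getD i ' ' = col.foldl cmbMerge 'I' := by
    rw [hbasis, foldl_zipWith_getD psl _ i hlenq (by simpa using hin)]
    have h1 : psl.map (fun p => p.getD i ' ') = col := by
      rw [hpsl, hcoldef, List.map_map]; rfl
    have h2 : (List.replicate n 'I').getD i ' ' = 'I' := by
      rw [List.getD_eq_getElem _ _ (by simpa using hin)]; simp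
    rw [h1, h2]
  simp only [List.getElem_map, List.getElem_range]
  have hbget : basis[i]'(by rw [hblen]; exact hin) = col.foldl cmbMerge 'I' := by
    rw [← List.getD_eq_getElem basis ' ' (by rw [hblen]; exact hin)]
    exact hbg
  rw [hbget, ofList_I]
  have hcontains : ∀ x : Char, (!PySem.Set.contains (['I'] : PySem.Set Char) x) = decide (x ≠ 'I') := by
    intro x
    by_cases hx : x = 'I' <;> simp [PySem.Set.contains, hx]
  by_cases hany : col.any (fun x => x ≠ 'I')
  · obtain ⟨c, hcmem, hcne⟩ := List.any_eq_true.mp hany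
    have hcne' : c ≠ 'I' := by simpa using hcne
    have huniq : ∀ x ∈ col, x ≠ 'I' → x = c := by
      intro x hx hxI
      rw [hcoldef] at hx
      obtain ⟨p, hp, rfl⟩ := List.mem_map.mp hx
      have hcm := hcmem
      rw [hcoldef] at hcm
      obtain ⟨q, hq, rfl⟩ := List.mem_map.mp hcm
      exact hcol p hp q hq i (List.mem_range.mpr hin) hxI hcne'
    rw [foldl_cmbMerge_char c col _ huniq, if_pos hany]
    have hfilter : PySem.Set.diff (PySem.Set.ofList col) ['I'] = [c] := by
      unfold PySem.Set.diff
      apply nodup_all_eq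
      · exact (PySem.Set.nodup_ofList col).filter _
      · intro x hx
        have hx1 := List.mem_filter.mp hx
        have hxcol : x ∈ col := (PySem.Set.mem_ofList _ _).mp hx1.1
        have hxI : x ≠ 'I' := by
          have := hx1.2
          rwa [hcontains x, decide_eq_true_iff] at this
        exact huniq x hxcol hxI
      · apply List.mem_filter.mpr
        refine ⟨(PySem.Set.mem_ofList _ _).mpr hcmem, ?_⟩
        rw [hcontains c]
        exact decide_eq_true hcne'
    rw [hfilter]
    simp [hcne']
  · rw [foldl_cmbMerge_char 'I' col _ (by
      intro x hx hxI
      exfalso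
      exact hany (List.any_eq_true.mpr ⟨x, hx, by simpa using hxI⟩)), if_neg hany]
    have hfilter : PySem.Set.diff (PySem.Set.ofList col) ['I'] = [] := by
      unfold PySem.Set.diff
      rw [List.filter_eq_nil_iff]
      intro x hx
      have hxcol : x ∈ col := (PySem.Set.mem_ofList _ _).mp hx
      rw [hcontains x]
      simp only [decide_eq_true_iff]
      by_contra hxI
      exact hany (List.any_eq_true.mpr ⟨x, hxcol, by simpa using hxI⟩)
    rw [hfilter]
    simp
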